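-- pv_equiv track=rewrite | github.com/moxie47/1150-lab-5 | WordWhompSolver_v1.py | lengthThreeWords
-- ===== SOURCE A (Python) =====
-- def lengthThreeWords(string1):
--     LENGTHstring = len(string1)
--     table = []
--     for firstPosition in range(0, LENGTHstring):
--         for secondPosition in range (0, LENGTHstring):
--             for thirdPosition in range(0, LENGTHstring):
--                 if firstPosition != secondPosition and firstPosition != thirdPosition and secondPosition != thirdPosition:
--                     table = table + [string1[firstPosition] + string1[secondPosition] + string1[thirdPosition]]
--     return table
-- ===== SOURCE B (Python) =====
-- def lengthThreeWords(string1):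
--     result = []
--     used = []
--     prefix = []
--
--     def choose():
--         if len(prefix) >= 3:
--             result.append(''.join(prefix))
--             return
--         for i in range(len(string1)):
--             if i not in used:
--                 used.append(i)
--                 prefix.append(string1[i])
--                 choose()
--                 prefix.pop()
--                 used.pop()
--
--     choose()
--     return result
-- ===== Notes on version B (the rewrite author's own statement) =====
-- stated objective: faster
-- what changed: Replaces the three hard-coded nested index loops, which rebuild the whole result list on every append, by a depth-3 recursive backtracking generator over a prefix and a used-index list that appends each word once.
import Mathlib
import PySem

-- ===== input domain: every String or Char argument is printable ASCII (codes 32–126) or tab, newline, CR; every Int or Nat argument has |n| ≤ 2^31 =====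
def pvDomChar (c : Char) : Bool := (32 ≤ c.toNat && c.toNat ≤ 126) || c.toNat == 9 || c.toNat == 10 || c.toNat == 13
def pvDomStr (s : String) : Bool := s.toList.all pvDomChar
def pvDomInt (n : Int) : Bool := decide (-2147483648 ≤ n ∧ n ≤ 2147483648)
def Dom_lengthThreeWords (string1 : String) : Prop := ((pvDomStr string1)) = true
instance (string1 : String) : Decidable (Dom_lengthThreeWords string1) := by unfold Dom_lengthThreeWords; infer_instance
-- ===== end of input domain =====

-- B replaces A's three nested index loops (with quadratic list re-building) by a depth-3
-- recursive backtracking generator over unused indices; same words in the same order.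

-- ===== PORT A =====
-- indexing string1[i] is always in range (i < len), so List.getD is exact here
def lengthThreeWords (string1 : String) : List String :=
  (List.range string1.toList.length).foldl (fun table firstPosition =>
    (List.range string1.toList.length).foldl (fun table secondPosition =>
      (List.range string1.toList.length).foldl (fun table thirdPosition =>
        if firstPosition ≠ secondPosition ∧ firstPosition ≠ thirdPosition ∧ secondPosition ≠ thirdPosition then
          table ++ [String.mk [string1.toList.getD firstPosition ' ',
                               string1.toList.getD secondPosition ' ',
                               string1.toList.getD thirdPosition ' ']]
        else table) table) table) []

-- ===== PORT B =====
-- recursive backtracker: pre = chosen chars so far, used = chosen indices so far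
def lengthThreeWordsGo (cs : List Char) (n : Nat) (pre : List Char) (used : List Nat) : List String :=
  if h : 3 ≤ pre.length then [String.mk pre]
  else
    (List.range n).foldl (fun result i =>
      if i ∈ used then result
      else result ++ lengthThreeWordsGo cs n (pre ++ [cs.getD i ' ']) (used ++ [i])) []
termination_by 3 - pre.length
decreasing_by simp at h ⊢; omega

def lengthThreeWords_alt (string1 : String) : List String :=
  lengthThreeWordsGo string1.toList string1.toList.length [] []

-- ===== PRECONDITION & SPEC =====
def Spec_lengthThreeWords (string1 : String) (out : List String) : Prop := out = lengthThreeWords_alt string1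
instance (string1 : String) (out : List String) : Decidable (Spec_lengthThreeWords string1 out) := by unfold Spec_lengthThreeWords; infer_instance

-- ===== CLAIM (what is proved, stated in full; the proofs are below) =====
def Claim_equal_lengthThreeWords : Prop := ∀ (string1 : String), Dom_lengthThreeWords string1 → Spec_lengthThreeWords string1 (lengthThreeWords string1)

-- ===== LEMMAS AND PROOFS =====

-- a foldl that skips elements satisfying c and extends with g otherwise
theorem foldl_skip_if {α β : Type} (l : List α) (c : α → Prop) [DecidablePred c]
    (g : α → List β) (init : List β) :
    l.foldl (fun acc i => if c i then acc else acc ++ g i) init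
      = init ++ l.flatMap (fun i => if c i then [] else g i) := by
  have h : (fun (acc : List β) i => if c i then acc else acc ++ g i)
      = fun acc i => acc ++ (if c i then [] else g i) := by
    funext acc i; split <;> simp
  rw [h, PySem.List.foldl_append_eq_flatMap]

theorem go_leaf (cs : List Char) (n : Nat) (pre : List Char) (used : List Nat)
    (h : pre.length = 3) : lengthThreeWordsGo cs n pre used = [String.mk pre] := by
  rw [lengthThreeWordsGo]; simp [h]

theorem go2 (cs : List Char) (n : Nat) (c1 c2 : Char) (i j : Nat) :
    lengthThreeWordsGo cs n [c1, c2] [i, j]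
      = (List.range n).flatMap (fun k => if k = i ∨ k = j then []
          else [String.mk [c1, c2, cs.getD k ' ']]) := by
  rw [lengthThreeWordsGo]
  simp only [List.length_cons, List.length_nil]
  rw [dif_neg (by omega)]
  rw [foldl_skip_if]
  simp only [List.nil_append, List.mem_cons, List.not_mem_nil, or_false]
  congr 1
  funext k
  split
  · rfl
  · rw [go_leaf] <;> simp

theorem go1 (cs : List Char) (n : Nat) (c1 : Char) (i : Nat) :
    lengthThreeWordsGo cs n [c1] [i]
      = (List.range n).flatMap (fun j => if j = i then []
          else lengthThreeWordsGo cs n [c1, cs.getD j ' '] [i, j]) := by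
  rw [lengthThreeWordsGo]
  simp only [List.length_cons, List.length_nil]
  rw [dif_neg (by omega)]
  rw [foldl_skip_if]
  simp

theorem go0 (cs : List Char) (n : Nat) :
    lengthThreeWordsGo cs n [] []
      = (List.range n).flatMap (fun i => lengthThreeWordsGo cs n [cs.getD i ' '] [i]) := by
  rw [lengthThreeWordsGo]
  simp only [List.length_nil]
  rw [dif_neg (by omega)]
  rw [foldl_skip_if]
  simp

theorem inner_eq (l : List Nat) (i j : Nat) (w : Nat → String) (hij : ¬ j = i) :
    (l.filter (fun k => decide (i ≠ j ∧ i ≠ k ∧ j ≠ k))).map w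
      = l.flatMap (fun k => if k = i ∨ k = j then [] else [w k]) := by
  have hij' : ¬ i = j := fun h => hij h.symm
  have hp : (fun k => decide (i ≠ j ∧ i ≠ k ∧ j ≠ k)) = (fun k => decide (¬(k = i ∨ k = j))) := by
    funext k; apply decide_eq_decide.mpr; constructor
    · rintro ⟨_, h2, h3⟩ (rfl | rfl) <;> [exact h2 rfl; exact h3 rfl]
    · intro h; exact ⟨hij', fun h2 => h (Or.inl h2.symm), fun h3 => h (Or.inr h3.symm)⟩
  rw [hp]
  induction l with
  | nil => simp
  | cons k l ih =>
    rw [List.filter_cons, List.flatMap_cons]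
    by_cases hk : k = i ∨ k = j
    · simp [hk]; simpa using ih
    · simp [hk]; simpa using ih

theorem lengthThreeWords_eq (cs : List Char) (n : Nat) :
    (List.range n).foldl (fun table firstPosition =>
      (List.range n).foldl (fun table secondPosition =>
        (List.range n).foldl (fun table thirdPosition =>
          if firstPosition ≠ secondPosition ∧ firstPosition ≠ thirdPosition ∧ secondPosition ≠ thirdPosition then
            table ++ [String.mk [cs.getD firstPosition ' ', cs.getD secondPosition ' ', cs.getD thirdPosition ' ']]
          else table) table) table) []
      = lengthThreeWordsGo cs n [] [] := by
  rw [go0]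
  simp only [go1, go2]
  simp only [PySem.List.foldl_append_ite, PySem.List.foldl_append_eq_flatMap, List.nil_append]
  congr 1
  funext i
  congr 1
  funext j
  by_cases hj : j = i
  · subst hj; simp
  · rw [if_neg hj]
    exact inner_eq (List.range n) i j _ hj

-- ===== VERDICT (by name: the statement is the Claim_ definition above) =====
theorem lengthThreeWords_spec : Claim_equal_lengthThreeWords := by
  intro s _
  unfold Spec_lengthThreeWords lengthThreeWords lengthThreeWords_alt
  exact lengthThreeWords_eq s.toList s.toList.length
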